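-- pv_equiv track=rewrite | github.com/cpumons/ctfs | Crypto/WeakRSA/RSA_decrypt.py | wiener_attack
-- ===== SOURCE A (Python) =====
-- from math import isqrt
--
-- def continued_fraction_expansion(a, b):
--     expansion = []
--     while b != 0:
--         expansion.append(a // b)
--         a, b = b, a % b
--     return expansion
--
-- def convergents_from_continued_fraction(expansion):
--     convergents = []
--     for i in range(len(expansion)):
--         if i == 0:
--             convergents.append((expansion[0], 1))
--         elif i == 1:
--             convergents.append((expansion[0] * expansion[1] + 1, expansion[1]))
--         else:
--             p0, q0 = convergents[i - 2]
--             p1, q1 = convergents[i - 1]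
--             p = expansion[i] * p1 + p0
--             q = expansion[i] * q1 + q0
--             convergents.append((p, q))
--     return convergents
--
-- def wiener_attack(e, n):
--     expansion = continued_fraction_expansion(e, n)
--     convergents = convergents_from_continued_fraction(expansion)
--
--     for k, d in convergents:
--         if k == 0:
--             continue
--         phi_n = (e * d - 1) // k
--         x = n - phi_n + 1
--         discriminant = x * x - 4 * n
--         if discriminant >= 0:
--             t = isqrt(discriminant)
--             if t * t == discriminant and (x + t) % 2 == 0:
--                 return d
--     return None
-- ===== SOURCE B (Python) =====
-- from math import isqrt
--
-- def _cf(a, b):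
--     # recursive continued-fraction expansion of a/b
--     return [] if b == 0 else [a // b] + _cf(b, a % b)
--
-- def _eval_cf(prefix):
--     # evaluate a finite continued fraction back-to-front; by continuant
--     # symmetry the resulting (num, den) is exactly the convergent pair
--     num, den = 1, 0
--     for a in reversed(prefix):
--         num, den = a * num + den, num
--     return num, den
--
-- def wiener_attack(e, n):
--     expansion = _cf(e, n)
--     for i in range(len(expansion)):
--         k, d = _eval_cf(expansion[:i + 1])
--         if k == 0:
--             continue
--         phi_n = (e * d - 1) // k
--         x = n - phi_n + 1
--         discriminant = x * x - 4 * n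
--         if discriminant >= 0:
--             t = isqrt(discriminant)
--             if t * t == discriminant and (x + t) % 2 == 0:
--                 return d
--     return None
-- ===== Notes on version B (the rewrite author's own statement) =====
-- stated objective: alternative
-- what changed: Drops the forward two-term convergent recurrence and the convergents list entirely: each candidate (k, d) is computed independently by evaluating the truncated continued fraction back-to-front (a right fold over the prefix), which by continuant symmetry yields exactly the same convergent pair; the expansion is built recursively.
import Mathlib
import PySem

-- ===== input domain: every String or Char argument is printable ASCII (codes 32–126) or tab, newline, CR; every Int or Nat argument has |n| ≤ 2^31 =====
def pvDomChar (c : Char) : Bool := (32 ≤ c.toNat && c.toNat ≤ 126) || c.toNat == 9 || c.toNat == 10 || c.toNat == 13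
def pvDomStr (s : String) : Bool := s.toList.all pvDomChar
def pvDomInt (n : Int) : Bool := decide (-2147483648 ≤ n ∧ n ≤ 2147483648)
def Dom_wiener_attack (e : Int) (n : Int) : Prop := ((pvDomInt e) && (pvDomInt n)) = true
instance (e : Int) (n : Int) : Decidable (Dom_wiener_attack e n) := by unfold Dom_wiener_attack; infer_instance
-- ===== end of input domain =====

-- B replaces the forward convergent recurrence and the convergents list by an
-- independent back-to-front evaluation of each truncated continued fraction
-- (continuant symmetry); same return value, no speed claim.

-- termination fact used by both ports (cited by name in decreasing_by)
theorem pvModNatAbsLt (a b : Int) (hb : ¬ b = 0) : (PySem.Int.mod a b).natAbs < b.natAbs := by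
  rcases lt_or_gt_of_ne hb with h | h
  · have := PySem.Int.mod_neg_bounds a h
    omega
  · have h1 := PySem.Int.mod_nonneg a h
    have h2 := PySem.Int.mod_lt a h
    omega

-- ===== PORT A =====
def continued_fraction_expansion (a b : Int) : List Int :=
  if _hb : b = 0 then []
  else PySem.Int.floordiv a b :: continued_fraction_expansion b (PySem.Int.mod a b)
termination_by b.natAbs
decreasing_by exact pvModNatAbsLt a b _hb

-- the indexed for-loop over range(len(expansion)); every index used is in range,
-- so the getD defaults are never read (Python indexing cannot raise here)
def convStep (expansion : List Int) (convergents : List (Int × Int)) (i : Nat) : List (Int × Int) :=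
  if i = 0 then convergents ++ [(expansion.getD 0 0, 1)]
  else if i = 1 then
    convergents ++ [(expansion.getD 0 0 * expansion.getD 1 0 + 1, expansion.getD 1 0)]
  else
    let p0 := (convergents.getD (i - 2) (0, 0)).1
    let q0 := (convergents.getD (i - 2) (0, 0)).2
    let p1 := (convergents.getD (i - 1) (0, 0)).1
    let q1 := (convergents.getD (i - 1) (0, 0)).2
    convergents ++ [(expansion.getD i 0 * p1 + p0, expansion.getD i 0 * q1 + q0)]

def convergents_from_continued_fraction (expansion : List Int) : List (Int × Int) :=
  (List.range expansion.length).foldl (convStep expansion) []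

-- A's for-loop over the convergents (isqrt is only applied to discriminant ≥ 0,
-- where Int.sqrt is exactly math.isqrt)
def wienerScanA (e n : Int) : List (Int × Int) → Option Int
  | [] => none
  | (k, d) :: rest =>
    if k = 0 then wienerScanA e n rest
    else
      let phi_n := PySem.Int.floordiv (e * d - 1) k
      let x := n - phi_n + 1
      let discriminant := x * x - 4 * n
      if discriminant ≥ 0 then
        let t := Int.sqrt discriminant
        if t * t = discriminant ∧ PySem.Int.mod (x + t) 2 = 0 then some d
        else wienerScanA e n rest
      else wienerScanA e n rest

def wiener_attack (e : Int) (n : Int) : Option Int :=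
  wienerScanA e n (convergents_from_continued_fraction (continued_fraction_expansion e n))

-- ===== PORT B =====
-- _cf: recursive continued-fraction expansion
def cfB (a b : Int) : List Int :=
  if _hb : b = 0 then []
  else [PySem.Int.floordiv a b] ++ cfB b (PySem.Int.mod a b)
termination_by b.natAbs
decreasing_by exact pvModNatAbsLt a b _hb

-- _eval_cf: 'for a in reversed(prefix): num, den = a*num+den, num' is a right fold
def evalCF (xs : List Int) : Int × Int :=
  xs.foldr (fun a s => (a * s.1 + s.2, s.1)) (1, 0)

-- the for-loop 'for i in range(len(expansion))'; expansion[:i+1] with 0 ≤ i+1 is take (i+1)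
def scanB (e n : Int) (exp : List Int) (i : Nat) : Option Int :=
  if _h : i < exp.length then
    let kd := evalCF (exp.take (i + 1))
    let k := kd.1
    let d := kd.2
    if k = 0 then scanB e n exp (i + 1)
    else
      let phi_n := PySem.Int.floordiv (e * d - 1) k
      let x := n - phi_n + 1
      let discriminant := x * x - 4 * n
      if discriminant ≥ 0 then
        let t := Int.sqrt discriminant
        if t * t = discriminant ∧ PySem.Int.mod (x + t) 2 = 0 then some d
        else scanB e n exp (i + 1)
      else scanB e n exp (i + 1)
  else none
termination_by exp.length - i

def wiener_attack_alt (e : Int) (n : Int) : Option Int :=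
  scanB e n (cfB e n) 0

-- ===== PRECONDITION & SPEC =====
def Spec_wiener_attack (e : Int) (n : Int) (out : Option Int) : Prop := out = wiener_attack_alt e n
instance (e : Int) (n : Int) (out : Option Int) : Decidable (Spec_wiener_attack e n out) := by unfold Spec_wiener_attack; infer_instance

-- ===== CLAIM (what is proved, stated in full; the proofs are below) =====
def Claim_equal_wiener_attack : Prop := ∀ (e : Int) (n : Int), Dom_wiener_attack e n → Spec_wiener_attack e n (wiener_attack e n)

-- ===== LEMMAS AND PROOFS =====

theorem cfB_eq_aux : ∀ (N : Nat) (a b : Int), b.natAbs ≤ N →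
    cfB a b = continued_fraction_expansion a b := by
  intro N
  induction N with
  | zero =>
    intro a b h
    have hb : b = 0 := by omega
    subst hb
    rw [cfB, continued_fraction_expansion]
    simp
  | succ N ih =>
    intro a b h
    by_cases hb : b = 0
    · subst hb; rw [cfB, continued_fraction_expansion]; simp
    · rw [cfB, continued_fraction_expansion]
      simp only [dif_neg hb, List.singleton_append, List.cons.injEq, true_and]
      exact ih b (PySem.Int.mod a b) (by have := pvModNatAbsLt a b hb; omega)

-- uniform convergent recurrence with explicit seeds (A-side characterisation)
def convs2 : List Int → Int → Int → Int → Int → List (Int × Int)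
  | [], _, _, _, _ => []
  | q :: rest, p0, q0, p1, q1 =>
    (q * p1 + p0, q * q1 + q0) :: convs2 rest p1 q1 (q * p1 + p0) (q * q1 + q0)

-- (second-to-last, last) of s1 :: s2 :: l
def last2 : List (Int × Int) → (Int × Int) → (Int × Int) → (Int × Int) × (Int × Int)
  | [], s1, s2 => (s1, s2)
  | a :: rest, _, s2 => last2 rest s2 a

theorem convs2_length (xs : List Int) : ∀ p0 q0 p1 q1, (convs2 xs p0 q0 p1 q1).length = xs.length := by
  induction xs with
  | nil => intros; rfl
  | cons x rest ih => intro p0 q0 p1 q1; simp [convs2, ih]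

theorem convs2_snoc (xs : List Int) (x : Int) : ∀ p0 q0 p1 q1,
    convs2 (xs ++ [x]) p0 q0 p1 q1 =
      convs2 xs p0 q0 p1 q1 ++
        [(x * (last2 (convs2 xs p0 q0 p1 q1) (p0, q0) (p1, q1)).2.1 +
            (last2 (convs2 xs p0 q0 p1 q1) (p0, q0) (p1, q1)).1.1,
          x * (last2 (convs2 xs p0 q0 p1 q1) (p0, q0) (p1, q1)).2.2 +
            (last2 (convs2 xs p0 q0 p1 q1) (p0, q0) (p1, q1)).1.2)] := by
  induction xs with
  | nil => intros; rfl
  | cons y ys ih =>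
    intro p0 q0 p1 q1
    simp only [List.cons_append, convs2, ih, last2]

theorem last2_getD (l : List (Int × Int)) : ∀ s1 s2, 2 ≤ l.length →
    last2 l s1 s2 = (l.getD (l.length - 2) (0, 0), l.getD (l.length - 1) (0, 0)) := by
  induction l with
  | nil => intro _ _ h; simp at h
  | cons a rest ih =>
    intro s1 s2 h
    match rest, ih with
    | [], _ => simp at h
    | [b], _ => rfl
    | b :: c :: rs, ih =>
      have h2 : 2 ≤ (b :: c :: rs).length := by simp
      rw [last2, ih s2 a h2]
      simp only [List.length_cons]
      have e1 : rs.length + 1 + 1 + 1 - 2 = (rs.length + 1 + 1 - 2) + 1 := by omega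
      have e2 : rs.length + 1 + 1 + 1 - 1 = (rs.length + 1 + 1 - 1) + 1 := by omega
      rw [e1, e2, List.getD_cons_succ, List.getD_cons_succ]

theorem take_snoc_getD (exp : List Int) (m : Nat) (h : m < exp.length) :
    exp.take (m + 1) = exp.take m ++ [exp.getD m 0] := by
  rw [List.take_add_one]
  congr 1
  simp [List.getElem?_eq_getElem h]

theorem conv_aux (exp : List Int) : ∀ m, m ≤ exp.length →
    (List.range m).foldl (convStep exp) [] = convs2 (exp.take m) 0 1 1 0 := by
  intro m
  induction m with
  | zero => intro _; rfl
  | succ m ih =>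
    intro h
    rw [List.range_succ, List.foldl_append, ih (by omega)]
    have htake := take_snoc_getD exp m (by omega)
    match m with
    | 0 => simp [convStep, convs2, htake]
    | 1 =>
      have h0 := take_snoc_getD exp 0 (by omega)
      rw [htake, h0]
      simp [convStep, convs2, mul_comm]
    | Nat.succ (Nat.succ m') =>
      have hlen : (convs2 (exp.take (m' + 1 + 1)) 0 1 1 0).length = m' + 1 + 1 := by
        rw [convs2_length, List.length_take]; omega
      have e2 : m' + 1 + 1 - 2 = m' := by omega
      have e1 : m' + 1 + 1 - 1 = m' + 1 := by omega
      rw [htake, convs2_snoc, last2_getD _ _ _ (by rw [hlen]; omega)]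
      simp only [List.foldl_cons, List.foldl_nil, convStep]
      rw [if_neg (by omega), if_neg (by omega)]
      simp only [hlen, e1, e2, List.getD]

theorem conv_eq_convs2 (exp : List Int) :
    convergents_from_continued_fraction exp = convs2 exp 0 1 1 0 := by
  rw [convergents_from_continued_fraction, conv_aux exp exp.length le_rfl, List.take_length]

-- B-side characterisation: backward evaluation with seed (0,1)
def evalCF2 (xs : List Int) : Int × Int :=
  xs.foldr (fun a s => (a * s.1 + s.2, s.1)) (0, 1)

-- linearity of the backward fold in its seed
theorem foldr_lin (xs : List Int) : ∀ a b : Int,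
    xs.foldr (fun a s => (a * s.1 + s.2, s.1)) (a, b) =
      (a * (evalCF xs).1 + b * (evalCF2 xs).1, a * (evalCF xs).2 + b * (evalCF2 xs).2) := by
  induction xs with
  | nil => intro a b; simp [evalCF, evalCF2]
  | cons x xs ih =>
    intro a b
    have hE : evalCF (x :: xs) = (x * (evalCF xs).1 + (evalCF xs).2, (evalCF xs).1) := rfl
    have hE2 : evalCF2 (x :: xs) = (x * (evalCF2 xs).1 + (evalCF2 xs).2, (evalCF2 xs).1) := rfl
    simp only [List.foldr_cons, ih a b, hE, hE2, Prod.mk.injEq]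
    refine ⟨by ring, trivial⟩

theorem evalCF_snoc (xs : List Int) (x : Int) :
    evalCF (xs ++ [x]) =
      (x * (evalCF xs).1 + (evalCF2 xs).1, x * (evalCF xs).2 + (evalCF2 xs).2) := by
  have : evalCF (xs ++ [x]) = xs.foldr (fun a s => (a * s.1 + s.2, s.1)) (x, 1) := by
    simp [evalCF, List.foldr_append]
  rw [this, foldr_lin]
  simp

theorem evalCF2_snoc (xs : List Int) (x : Int) : evalCF2 (xs ++ [x]) = evalCF xs := by
  simp [evalCF2, evalCF, List.foldr_append]

-- the list of all convergents equals the list of backward prefix evaluations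
theorem convs2_eq_prefMap (xs : List Int) :
    convs2 xs 0 1 1 0 = (List.range xs.length).map (fun i => evalCF (xs.take (i + 1))) ∧
      last2 (convs2 xs 0 1 1 0) (0, 1) (1, 0) = (evalCF2 xs, evalCF xs) := by
  induction xs using List.reverseRecOn with
  | nil => exact ⟨rfl, rfl⟩
  | append_singleton ys x ih =>
    obtain ⟨h1, h2⟩ := ih
    have hsnoc := convs2_snoc ys x 0 1 1 0
    rw [h2] at hsnoc
    have hnew : convs2 (ys ++ [x]) 0 1 1 0 =
        convs2 ys 0 1 1 0 ++ [evalCF (ys ++ [x])] := by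
      rw [hsnoc, evalCF_snoc]
    constructor
    · rw [hnew, h1]
      rw [List.length_append, List.length_singleton, List.range_succ, List.map_append]
      congr 1
      · apply List.map_congr_left
        intro i hi
        have hi' : i < ys.length := List.mem_range.mp hi
        rw [List.take_append_of_le_length (by omega)]
      · simp only [List.map_cons, List.map_nil, List.cons.injEq, and_true]
        rw [List.take_of_length_le (by simp)]
    · rw [hnew]
      have hlast : ∀ (l : List (Int × Int)) (a : Int × Int) s1 s2,
          last2 (l ++ [a]) s1 s2 = ((last2 l s1 s2).2, a) := by
        intro l
        induction l with
        | nil => intros; rfl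
        | cons p rest ih2 => intro a s1 s2; simp only [List.cons_append, last2, ih2]
      rw [hlast, h2, evalCF2_snoc]

-- the fused index scan equals A's scan over the prefix-evaluation list
theorem scanB_eq (e n : Int) (exp : List Int) : ∀ (N i : Nat), exp.length - i ≤ N →
    scanB e n exp i =
      wienerScanA e n ((List.range (exp.length - i)).map
        (fun j => evalCF (exp.take (i + j + 1)))) := by
  intro N
  induction N with
  | zero =>
    intro i h
    have h0 : exp.length - i = 0 := by omega
    rw [scanB, h0]
    simp only [List.range_zero, List.map_nil, wienerScanA]
    rw [dif_neg (by omega)]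
  | succ N ih =>
    intro i h
    by_cases hi : i < exp.length
    · have hk : exp.length - i = (exp.length - (i + 1)) + 1 := by omega
      rw [scanB, dif_pos hi, hk, List.range_succ_eq_map]
      simp only [List.map_cons, List.map_map]
      have hcomp : ((fun j => evalCF (exp.take (i + j + 1))) ∘ (fun j => j + 1)) =
          (fun j => evalCF (exp.take ((i + 1) + j + 1))) := by
        funext j; simp only [Function.comp]; congr 2; omega
      rw [hcomp]
      have hrec := ih (i + 1) (by omega)
      simp only [Nat.add_zero] at *
      rw [wienerScanA]
      simp only [← hrec]
    · rw [scanB, dif_neg hi]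
      have h0 : exp.length - i = 0 := by omega
      rw [h0]
      simp [wienerScanA]

-- ===== VERDICT (by name: the statement is the Claim_ definition above) =====
theorem wiener_attack_spec : Claim_equal_wiener_attack := by
  intro e n _
  unfold Spec_wiener_attack wiener_attack wiener_attack_alt
  rw [cfB_eq_aux n.natAbs e n le_rfl, conv_eq_convs2,
      (convs2_eq_prefMap (continued_fraction_expansion e n)).1,
      scanB_eq e n (continued_fraction_expansion e n)
        (continued_fraction_expansion e n).length 0 (by omega)]
  simp
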